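-- pv_equiv track=rewrite | github.com/emersonrafaels/construct-cost-ai | src/utils/lpu/lpu_functions.py | split_regiao_grupo
-- ===== SOURCE A (Python) =====
-- from typing import List, Tuple
--
-- def split_regiao_grupo(regiao_grupo: str, regions: List[str], groups: List[str]) -> Tuple[str, str]:
--     """
--     Divide a coluna regiao_grupo em 'regiao' e 'grupo' com base nas regiões e grupos definidos.
--
--     Args:
--         regiao_grupo (str): Valor da coluna regiao_grupo (ex.: 'CENTRO-OESTE/NORDESTE-GRUPO1').
--         regions (List[str]): Lista de regiões definidas no settings.
--         groups (List[str]): Lista de grupos definidos no settings.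
--
--     Returns:
--         Tuple[str, str]: Uma tupla contendo 'regiao' e 'grupo'.
--
--     Raises:
--         ValueError: Se o valor não puder ser dividido corretamente.
--     """
--     for region in regions:
--         for group in groups:
--             if f"-{group}" in regiao_grupo and region in regiao_grupo:
--                 regiao = regiao_grupo.split(f"-{group}")[0].strip()
--                 grupo = group
--                 return regiao, grupo
--     raise ValueError(f"Não foi possível dividir o valor '{regiao_grupo}' em 'regiao' e 'grupo'.")
-- ===== SOURCE B (Python) =====
-- from typing import List, Tuple
--
-- def split_regiao_grupo(regiao_grupo: str, regions: List[str], groups: List[str]) -> Tuple[str, str]: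
--     # Two independent one-dimensional passes instead of a nested region x group scan:
--     # region membership only gates entry; the group found is the first in group order.
--     if any(region in regiao_grupo for region in regions):
--         for group in groups:
--             sep = f"-{group}"
--             if sep in regiao_grupo:
--                 return regiao_grupo.split(sep)[0].strip(), group
--     raise ValueError(f"Não foi possível dividir o valor '{regiao_grupo}' em 'regiao' e 'grupo'.")
-- ===== Notes on version B (the rewrite author's own statement) =====
-- stated objective: simpler
-- what changed: The nested region x group scan is replaced by one boolean membership pass over regions that merely gates entry, followed by a single loop over groups returning the first matching group.
import Mathlib
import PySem

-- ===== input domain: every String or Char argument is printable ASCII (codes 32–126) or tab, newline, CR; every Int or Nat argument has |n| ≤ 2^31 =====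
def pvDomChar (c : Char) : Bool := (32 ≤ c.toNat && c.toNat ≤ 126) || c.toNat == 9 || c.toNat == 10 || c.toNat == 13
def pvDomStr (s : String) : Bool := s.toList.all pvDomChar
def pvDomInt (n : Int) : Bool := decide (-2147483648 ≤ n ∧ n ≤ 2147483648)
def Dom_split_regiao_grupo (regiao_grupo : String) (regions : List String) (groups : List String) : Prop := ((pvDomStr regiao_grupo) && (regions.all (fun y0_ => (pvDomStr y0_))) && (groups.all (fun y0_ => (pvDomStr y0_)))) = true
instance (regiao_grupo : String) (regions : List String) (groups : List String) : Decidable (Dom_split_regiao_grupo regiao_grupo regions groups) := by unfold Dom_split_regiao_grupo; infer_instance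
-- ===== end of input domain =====

-- B replaces A's nested region×group scan by one boolean membership pass over regions
-- gating a single loop over groups (simpler decomposition, same results, same ValueError).
-- Equivalence is about the RETURN value on Pre_ (the inputs where A returns; elsewhere A raises).

-- ===== PORT A =====
-- the value `regiao_grupo.split(f"-{group}")[0].strip()`; split with a nonempty
-- separator never returns an empty list, so [0] is headD (exact on these inputs)
def pvSplitHead (s sep : String) : String :=
  PySem.Str.strip ((((PySem.Str.split? s sep).getD []).headD ""))

-- inner `for group in groups` loop of A
def pvAInner (s region : String) : List String → Option (String × String)
  | [] => none
  | g :: gs =>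
    if PySem.Str.isIn ("-" ++ g) s && PySem.Str.isIn region s then
      some (pvSplitHead s ("-" ++ g), g)
    else pvAInner s region gs

-- outer `for region in regions` loop; none = the ValueError (excluded by Pre_)
def pvAOuter (s : String) (groups : List String) : List String → Option (String × String)
  | [] => none
  | r :: rs =>
    match pvAInner s r groups with
    | some x => some x
    | none => pvAOuter s groups rs

def split_regiao_grupo (regiao_grupo : String) (regions : List String) (groups : List String) : String × String :=
  (pvAOuter regiao_grupo groups regions).getD ("", "")

-- ===== PORT B =====
-- B's single `for group in groups` loop
def pvBGroups (s : String) : List String → Option (String × String)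
  | [] => none
  | g :: gs =>
    if PySem.Str.isIn ("-" ++ g) s then
      some (pvSplitHead s ("-" ++ g), g)
    else pvBGroups s gs

def split_regiao_grupo_alt (regiao_grupo : String) (regions : List String) (groups : List String) : String × String :=
  if regions.any (fun region => PySem.Str.isIn region regiao_grupo) then
    (pvBGroups regiao_grupo groups).getD ("", "")
  else ("", "")      -- ValueError branch (excluded by Pre_)

-- ===== PRECONDITION & SPEC =====
-- Pre_ = exactly the inputs where Python A RETURNS (some region is a substring of
-- regiao_grupo AND some "-group" is a substring); everywhere else A raises ValueError.
def Pre_split_regiao_grupo (regiao_grupo : String) (regions : List String) (groups : List String) : Prop :=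
  (∃ r ∈ regions, PySem.Str.isIn r regiao_grupo = true) ∧
  (∃ g ∈ groups, PySem.Str.isIn ("-" ++ g) regiao_grupo = true)
instance (regiao_grupo : String) (regions : List String) (groups : List String) : Decidable (Pre_split_regiao_grupo regiao_grupo regions groups) := by unfold Pre_split_regiao_grupo; infer_instance

def pvWitness_split_regiao_grupo : String × List String × List String :=
  ("CENTRO-OESTE-GRUPO1", ["CENTRO-OESTE", "NORDESTE"], ["GRUPO1", "GRUPO2"])

def Spec_split_regiao_grupo (regiao_grupo : String) (regions : List String) (groups : List String) (out : String × String) : Prop := out = split_regiao_grupo_alt regiao_grupo regions groups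
instance (regiao_grupo : String) (regions : List String) (groups : List String) (out : String × String) : Decidable (Spec_split_regiao_grupo regiao_grupo regions groups out) := by unfold Spec_split_regiao_grupo; infer_instance

-- ===== CLAIM (what is proved, stated in full; the proofs are below) =====
def Claim_equal_split_regiao_grupo : Prop := ∀ (regiao_grupo : String) (regions : List String) (groups : List String), Dom_split_regiao_grupo regiao_grupo regions groups → Pre_split_regiao_grupo regiao_grupo regions groups → Spec_split_regiao_grupo regiao_grupo regions groups (split_regiao_grupo regiao_grupo regions groups)

-- ===== LEMMAS AND PROOFS =====

-- A's inner loop for a matching region is exactly B's group loop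
theorem pvAInner_of_isIn (s region : String) (groups : List String)
    (h : PySem.Str.isIn region s = true) :
    pvAInner s region groups = pvBGroups s groups := by
  simp only [PySem.Str.isIn_eq] at h
  induction groups with
  | nil => rfl
  | cons g gs ih =>
    simp [pvAInner, pvBGroups, h, ih]

-- A's inner loop for a non-matching region finds nothing
theorem pvAInner_of_not_isIn (s region : String) (groups : List String)
    (h : PySem.Str.isIn region s = false) :
    pvAInner s region groups = none := by
  simp only [PySem.Str.isIn_eq] at h
  induction groups with
  | nil => rfl
  | cons g gs ih => simp [pvAInner, h, ih]

-- if some group matches, B's group loop succeeds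
theorem pvBGroups_isSome (s : String) (groups : List String)
    (h : ∃ g ∈ groups, PySem.Str.isIn ("-" ++ g) s = true) :
    (pvBGroups s groups).isSome = true := by
  induction groups with
  | nil => simp at h
  | cons g gs ih =>
    by_cases hg : PySem.Str.isIn ("-" ++ g) s = true
    · have hg2 : PySem.Chars.isIn ('-' :: g.toList) s.toList = true := by
        simpa [PySem.Str.isIn_eq] using hg
      simp [pvBGroups, hg2]
    · have hg2 : PySem.Chars.isIn ('-' :: g.toList) s.toList = false := by
        simpa [PySem.Str.isIn_eq] using eq_false_of_ne_true hg
      have hstep : pvBGroups s (g :: gs) = pvBGroups s gs := by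
        simp [pvBGroups, hg2]
      rw [hstep]
      apply ih
      rcases h with ⟨g2, hg2, hin⟩
      rcases List.mem_cons.mp hg2 with rfl | hmem
      · exact absurd hin hg
      · exact ⟨g2, hmem, hin⟩

-- under Pre_, A's outer loop returns exactly B's group-loop result
theorem pvAOuter_eq (s : String) (groups regions : List String)
    (hr : ∃ r ∈ regions, PySem.Str.isIn r s = true)
    (hg : ∃ g ∈ groups, PySem.Str.isIn ("-" ++ g) s = true) :
    pvAOuter s groups regions = pvBGroups s groups := by
  induction regions with
  | nil => simp at hr
  | cons r rs ih =>
    by_cases h : PySem.Str.isIn r s = true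
    · have hinner := pvAInner_of_isIn s r groups h
      have hsome := pvBGroups_isSome s groups hg
      unfold pvAOuter
      rw [hinner]
      rcases Option.isSome_iff_exists.mp hsome with ⟨x, hx⟩
      rw [hx]
    · have hinner := pvAInner_of_not_isIn s r groups (Bool.not_eq_true _ ▸ eq_false_of_ne_true h)
      unfold pvAOuter
      rw [hinner]
      apply ih
      rcases hr with ⟨r', hr', hin⟩
      rcases List.mem_cons.mp hr' with rfl | hmem
      · exact absurd hin h
      · exact ⟨r', hmem, hin⟩

-- ===== VERDICT (by name: the statement is the Claim_ definition above) =====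
theorem split_regiao_grupo_spec : Claim_equal_split_regiao_grupo := by
  intro s regions groups _ hpre
  rcases hpre with ⟨hr, hg⟩
  unfold Spec_split_regiao_grupo split_regiao_grupo split_regiao_grupo_alt
  have hany : regions.any (fun region => PySem.Str.isIn region s) = true := by
    rcases hr with ⟨r, hmem, hin⟩
    exact List.any_eq_true.mpr ⟨r, hmem, hin⟩
  rw [hany, if_pos rfl, pvAOuter_eq s groups regions hr hg]
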